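-- pv_equiv track=rewrite | github.com/pypi-data/pypi-mirror-395 | packages/humanmint/humanmint-2.0.1-py3-none-any.whl/humanmint/titles/enhancements.py | _extract_rank
-- ===== SOURCE A (Python) =====
-- RANK_HIERARCHY = {
--     # Chief/Director level
--     "chief": 100,
--     "director": 95,
--     "manager": 90,
--     "supervisor": 85,
--     "coordinator": 80,
--
--     # Professional level
--     "engineer": 75,
--     "architect": 74,
--     "analyst": 73,
--     "specialist": 72,
--     "officer": 71,
--
--     # Technical level
--     "technician": 60,
--     "assistant": 50,
--     "associate": 55,
--     "aide": 45,
--     "helper": 40,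
-- }
--
-- def _extract_rank(title: str) -> int:
--     """
--     Extract the effective rank from a title.
--
--     When multiple ranks exist, uses the highest but accounts for demotion
--     indicators (e.g., "engineer" + "technician" = technician rank).
--
--     Args:
--         title: Job title string
--
--     Returns:
--         Rank score (0-100), higher = more senior
--     """
--     title_lower = title.lower()
--     found_ranks = []
--
--     for rank_word, rank_score in RANK_HIERARCHY.items():
--         if rank_word in title_lower:
--             found_ranks.append((rank_word, rank_score))
--
--     if not found_ranks:
--         return 0
--
--     # If multiple ranks found, check for demotion patterns
--     # e.g., "engineering technician" should use technician rank, not engineer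
--     if len(found_ranks) > 1:
--         # Sort by rank score
--         found_ranks.sort(key=lambda x: x[1], reverse=True)
--         lowest_rank_word = found_ranks[-1][0]
--
--         # Check if it's a compound like "X technician" or "X assistant"
--         if lowest_rank_word in ("technician", "assistant", "aide", "helper"):
--             if lowest_rank_word in title_lower.split()[-2:]:  # Check last 2 words
--                 return found_ranks[-1][1]  # Use the lower rank
--
--     # Return highest rank found
--     return found_ranks[0][1]
-- ===== SOURCE B (Python) =====
-- RANK_HIERARCHY = {
--     "chief": 100,
--     "director": 95,
--     "manager": 90,
--     "supervisor": 85,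
--     "coordinator": 80,
--     "engineer": 75,
--     "architect": 74,
--     "analyst": 73,
--     "specialist": 72,
--     "officer": 71,
--     "technician": 60,
--     "assistant": 50,
--     "associate": 55,
--     "aide": 45,
--     "helper": 40,
-- }
--
--
-- def _extract_rank(title: str) -> int:
--     # One pass: track the number of matches, the best score, and the
--     # lowest-scoring (score, word) pair; no list, no sort.
--     title_lower = title.lower()
--     count = 0
--     best = 0
--     worst_score = 0
--     worst_word = ""
--     for word, score in RANK_HIERARCHY.items():
--         if word in title_lower:
--             count += 1
--             if count == 1 or score > best:
--                 best = score
--             if count == 1 or score < worst_score: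
--                 worst_score = score
--                 worst_word = word
--     if count == 0:
--         return 0
--     if count > 1 and worst_word in ("technician", "assistant", "aide", "helper"):
--         if worst_word in title_lower.split()[-2:]:
--             return worst_score
--     return best
-- ===== Notes on version B (the rewrite author's own statement) =====
-- stated objective: simpler
-- what changed: Replaces the collect-into-a-list-then-sort logic with a single pass that maintains the match count, the maximum score, and the minimum-scoring (score, word) pair, so no list is built and no sort is performed.
import Mathlib
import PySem

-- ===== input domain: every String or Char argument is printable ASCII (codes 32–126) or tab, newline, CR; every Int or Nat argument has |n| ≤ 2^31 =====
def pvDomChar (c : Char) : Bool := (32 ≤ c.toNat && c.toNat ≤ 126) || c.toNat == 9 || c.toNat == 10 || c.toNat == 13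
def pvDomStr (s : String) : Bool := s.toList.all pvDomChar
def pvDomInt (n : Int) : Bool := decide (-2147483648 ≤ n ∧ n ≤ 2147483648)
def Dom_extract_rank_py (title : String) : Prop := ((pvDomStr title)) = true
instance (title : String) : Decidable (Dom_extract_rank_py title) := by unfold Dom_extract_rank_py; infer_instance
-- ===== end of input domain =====

-- B replaces A's collect-then-sort over matched rank words by a single pass that keeps the
-- match count, the maximum score and the minimum-scoring (score, word) pair (objective: simpler).

-- ===== PORT A =====

-- RANK_HIERARCHY.items() in insertion order (distinct keys, so a plain list of pairs)
def rankHierarchy : List (String × Int) :=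
  [("chief", 100), ("director", 95), ("manager", 90), ("supervisor", 85), ("coordinator", 80),
   ("engineer", 75), ("architect", 74), ("analyst", 73), ("specialist", 72), ("officer", 71),
   ("technician", 60), ("assistant", 50), ("associate", 55), ("aide", 45), ("helper", 40)]

def demotions : List String := ["technician", "assistant", "aide", "helper"]

def extract_rank_py (title : String) : Int :=
  let title_lower := PySem.Str.lower title
  let found_ranks := rankHierarchy.foldl
    (fun acc p => if PySem.Str.isIn p.1 title_lower then acc ++ [p] else acc) []
  if found_ranks.isEmpty then 0
  else
    -- 'found_ranks.sort(key=..., reverse=True)' inside the 'len > 1' branch: shadowing models the mutation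
    let found_ranks :=
      if 1 < found_ranks.length then PySem.List.sorted found_ranks (fun x => x.2) true
      else found_ranks
    -- the early 'return found_ranks[-1][1]' modelled by an Option
    let demoted : Option Int :=
      if 1 < found_ranks.length then
        let low := (PySem.List.pyGet? found_ranks (-1)).getD ("", 0)
        if low.1 ∈ demotions then
          if low.1 ∈ PySem.List.slice (PySem.Str.split₀ title_lower) (some (-2)) none then
            some low.2
          else none
        else none
      else none
    match demoted with
    | some v => v
    | none => ((PySem.List.pyGet? found_ranks 0).getD ("", 0)).2

-- ===== PORT B =====

-- loop body when 'word in title_lower' matched: bump count, update best and worst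
def mStep (st : Int × Int × Int × String) (p : String × Int) : Int × Int × Int × String :=
  let count := st.1 + 1
  let best := if count == 1 || st.2.1 < p.2 then p.2 else st.2.1
  let worst_score := if count == 1 || p.2 < st.2.2.1 then p.2 else st.2.2.1
  let worst_word := if count == 1 || p.2 < st.2.2.1 then p.1 else st.2.2.2
  (count, best, worst_score, worst_word)

def bStep (title_lower : String) (st : Int × Int × Int × String) (p : String × Int) :
    Int × Int × Int × String :=
  if PySem.Str.isIn p.1 title_lower then mStep st p else st

def extract_rank_py_alt (title : String) : Int :=
  let title_lower := PySem.Str.lower title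
  let st := rankHierarchy.foldl (bStep title_lower) (0, 0, 0, "")
  if st.1 == 0 then 0
  else if 1 < st.1 ∧ st.2.2.2 ∈ demotions then
    if st.2.2.2 ∈ PySem.List.slice (PySem.Str.split₀ title_lower) (some (-2)) none then st.2.2.1
    else st.2.1
  else st.2.1

-- ===== PRECONDITION & SPEC =====
def Spec_extract_rank_py (title : String) (out : Int) : Prop := out = extract_rank_py_alt title
instance (title : String) (out : Int) : Decidable (Spec_extract_rank_py title out) := by unfold Spec_extract_rank_py; infer_instance

-- ===== CLAIM (what is proved, stated in full; the proofs are below) =====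
def Claim_equal_extract_rank_py : Prop := ∀ (title : String), Dom_extract_rank_py title → Spec_extract_rank_py title (extract_rank_py title)

-- ===== LEMMAS AND PROOFS =====

-- A's result as a function of the matched sublist and the last-two-words list
def aRes (sub : List (String × Int)) (lastTwo : List String) : Int :=
  if sub.isEmpty then 0
  else
    let s := if 1 < sub.length then PySem.List.sorted sub (fun x => x.2) true else sub
    let demoted : Option Int :=
      if 1 < s.length then
        let low := (PySem.List.pyGet? s (-1)).getD ("", 0)
        if low.1 ∈ demotions then
          if low.1 ∈ lastTwo then some low.2 else none
        else none
      else none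
    match demoted with
    | some v => v
    | none => ((PySem.List.pyGet? s 0).getD ("", 0)).2

-- B's result as a function of the matched sublist and the last-two-words list
def bRes (sub : List (String × Int)) (lastTwo : List String) : Int :=
  let st := sub.foldl mStep (0, 0, 0, "")
  if st.1 == 0 then 0
  else if 1 < st.1 ∧ st.2.2.2 ∈ demotions then
    if st.2.2.2 ∈ lastTwo then st.2.2.1 else st.2.1
  else st.2.1

def wMax (b : Int) (t : List (String × Int)) : Int :=
  t.foldl (fun a p => if a < p.2 then p.2 else a) b

def wMin (m : Int × String) (t : List (String × Int)) : Int × String :=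
  t.foldl (fun m p => if p.2 < m.1 then (p.2, p.1) else m) m

lemma portA_eq (title : String) :
    extract_rank_py title =
      aRes (rankHierarchy.filter (fun p => PySem.Str.isIn p.1 (PySem.Str.lower title)))
        (PySem.List.slice (PySem.Str.split₀ (PySem.Str.lower title)) (some (-2)) none) := by
  unfold extract_rank_py aRes
  simp only [PySem.List.foldl_append_if, List.nil_append, List.map_id']

lemma portB_eq (title : String) :
    extract_rank_py_alt title =
      bRes (rankHierarchy.filter (fun p => PySem.Str.isIn p.1 (PySem.Str.lower title)))
        (PySem.List.slice (PySem.Str.split₀ (PySem.Str.lower title)) (some (-2)) none) := by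
  unfold extract_rank_py_alt bRes
  simp only [List.foldl_filter]
  rfl

lemma bfold (t : List (String × Int)) : ∀ (c b ws : Int) (ww : String), 1 ≤ c →
    t.foldl mStep (c, b, ws, ww) = (c + t.length, wMax b t, wMin (ws, ww) t) := by
  induction t with
  | nil => intro c b ws ww _; simp [wMax, wMin]
  | cons p t ih =>
    intro c b ws ww hc
    have h1 : (c + 1 == 1) = false := by simp; omega
    have hpair : ((if p.2 < ws then p.2 else ws : Int), (if p.2 < ws then p.1 else ww : String))
        = if p.2 < ws then (p.2, p.1) else (ws, ww) := by split <;> rfl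
    simp only [List.foldl_cons, mStep, h1, Bool.false_or, decide_eq_true_eq]
    rw [show ((c + 1, if b < p.2 then p.2 else b,
          if p.2 < ws then p.2 else ws, if p.2 < ws then p.1 else ww) : Int × Int × Int × String)
        = (c + 1, (if b < p.2 then p.2 else b : Int),
          (if p.2 < ws then (p.2, p.1) else (ws, ww) : Int × String)) from by rw [← hpair]]
    rw [ih (c + 1) _ _ _ (by omega)]
    simp only [wMax, wMin, List.foldl_cons, List.length_cons, Prod.mk.injEq, Prod.mk.eta]
    refine ⟨by push_cast; ring, ?_⟩
    constructor

lemma wMax_ge (t : List (String × Int)) : ∀ b : Int, b ≤ wMax b t ∧ ∀ p ∈ t, p.2 ≤ wMax b t := by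
  induction t with
  | nil => intro b; simp [wMax]
  | cons q t ih =>
    intro b
    have h := ih (if b < q.2 then q.2 else b)
    have hb : b ≤ (if b < q.2 then q.2 else b) := by split <;> omega
    have hq : q.2 ≤ (if b < q.2 then q.2 else b) := by split <;> omega
    refine ⟨le_trans hb h.1, ?_⟩
    intro p hp
    rcases List.mem_cons.mp hp with rfl | hp
    · exact le_trans hq h.1
    · exact h.2 p hp

lemma wMax_mem (t : List (String × Int)) : ∀ b : Int, wMax b t = b ∨ ∃ q ∈ t, q.2 = wMax b t := by
  induction t with
  | nil => intro b; left; rfl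
  | cons q t ih =>
    intro b
    have h := ih (if b < q.2 then q.2 else b)
    have hstep : wMax b (q :: t) = wMax (if b < q.2 then q.2 else b) t := rfl
    rcases h with h | ⟨r, hr, hre⟩
    · by_cases hbq : b < q.2
      · right; refine ⟨q, List.mem_cons_self, ?_⟩
        rw [hstep, h]; simp [hbq]
      · left; rw [hstep, h]; simp [hbq]
    · right; exact ⟨r, List.mem_cons_of_mem _ hr, hstep ▸ hre⟩

lemma wMin_le (t : List (String × Int)) : ∀ m : Int × String,
    (wMin m t).1 ≤ m.1 ∧ ∀ p ∈ t, (wMin m t).1 ≤ p.2 := by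
  induction t with
  | nil => intro m; simp [wMin]
  | cons q t ih =>
    intro m
    have hstep : wMin m (q :: t) = wMin (if q.2 < m.1 then (q.2, q.1) else m) t := rfl
    have h := ih (if q.2 < m.1 then (q.2, q.1) else m)
    have hm : (if q.2 < m.1 then ((q.2, q.1) : Int × String) else m).1 ≤ m.1 := by
      split
      · exact le_of_lt ‹q.2 < m.1›
      · exact le_refl _
    have hq : (if q.2 < m.1 then ((q.2, q.1) : Int × String) else m).1 ≤ q.2 := by
      split
      · exact le_refl _
      · omega
    refine ⟨hstep ▸ le_trans h.1 hm, ?_⟩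
    intro p hp
    rcases List.mem_cons.mp hp with rfl | hp
    · exact hstep ▸ le_trans h.1 hq
    · exact hstep ▸ h.2 p hp

lemma wMin_mem (t : List (String × Int)) : ∀ m : Int × String,
    wMin m t = m ∨ ∃ q ∈ t, ((wMin m t).2, (wMin m t).1) = q := by
  induction t with
  | nil => intro m; left; rfl
  | cons q t ih =>
    intro m
    have hstep : wMin m (q :: t) = wMin (if q.2 < m.1 then (q.2, q.1) else m) t := rfl
    rcases ih (if q.2 < m.1 then (q.2, q.1) else m) with h | ⟨r, hr, hre⟩
    · by_cases hq : q.2 < m.1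
      · right; refine ⟨q, List.mem_cons_self, ?_⟩
        rw [hstep, h]; simp [hq]
      · left; rw [hstep, h]; simp [hq]
    · right; exact ⟨r, List.mem_cons_of_mem _ hr, hstep ▸ hre⟩

lemma last_min : ∀ (l : List (String × Int)), l.Pairwise (fun a b : String × Int => b.2 ≤ a.2) →
    ∀ z, l.getLast? = some z → ∀ x ∈ l, z.2 ≤ x.2 := by
  intro l
  induction l with
  | nil => simp
  | cons a l ih =>
    intro h z hz x hx
    rcases List.pairwise_cons.mp h with ⟨ha, hl⟩
    cases l with
    | nil =>
      simp at hz hx; subst hz; subst hx; exact le_refl _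
    | cons b l' =>
      rw [List.getLast?_cons_cons] at hz
      rcases List.mem_cons.mp hx with rfl | hx'
      · exact ha z (List.mem_of_getLast? hz)
      · exact ih hl z hz x hx'

lemma core (sub : List (String × Int)) (lastTwo : List String)
    (hnd : (sub.map (fun p => p.2)).Nodup) : aRes sub lastTwo = bRes sub lastTwo := by
  match sub with
  | [] => rfl
  | [e] => simp [aRes, bRes, mStep]
  | h1 :: h2 :: t =>
    have h1st : mStep (0, 0, 0, "") h1 = (1, h1.2, h1.2, h1.1) := by simp [mStep]
    have hb : (h1 :: h2 :: t).foldl mStep ((0 : Int), (0 : Int), (0 : Int), "") =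
        (1 + ((h2 :: t).length : Int), wMax h1.2 (h2 :: t), wMin (h1.2, h1.1) (h2 :: t)) := by
      rw [List.foldl_cons, h1st, bfold (h2 :: t) 1 _ _ _ (by omega)]
    set M := wMax h1.2 (h2 :: t) with hMdef
    set m := wMin (h1.2, h1.1) (h2 :: t) with hmdef
    set S := PySem.List.sorted (h1 :: h2 :: t) (fun x : String × Int => x.2) true with hSdef
    have hSnil : S ≠ [] := by
      intro hc
      have h := (PySem.List.sorted_eq_nil_iff (h1 :: h2 :: t) (fun x : String × Int => x.2) true).mp
        (by rw [← hSdef]; exact hc)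
      exact List.cons_ne_nil _ _ h
    obtain ⟨sh, st', hs⟩ := List.exists_cons_of_ne_nil hSnil
    have hs' : PySem.List.sorted (h1 :: h2 :: t) (fun x : String × Int => x.2) true = sh :: st' := by
      rw [← hSdef]; exact hs
    have hperm : S.Perm (h1 :: h2 :: t) := PySem.List.sorted_perm _ _ _
    have hpw : S.Pairwise (fun a b : String × Int => b.2 ≤ a.2) := PySem.List.sorted_pairwise_rev _ _
    have hhead : ∀ y ∈ (h1 :: h2 :: t), y.2 ≤ sh.2 := by
      intro y hy
      exact PySem.List.key_head_sorted_rev_ge _ _ hs' y hy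
    have hSL : S.getLast? = some (S.getLast hSnil) := List.getLast?_eq_some_getLast ..
    set z := S.getLast hSnil with hzdef
    have hzmem : z ∈ (h1 :: h2 :: t) := hperm.mem_iff.mp (List.getLast_mem hSnil)
    have hzmin : ∀ x ∈ (h1 :: h2 :: t), z.2 ≤ x.2 := by
      intro x hx
      exact last_min S hpw z hSL x (hperm.mem_iff.mpr hx)
    have hMax := wMax_ge (h2 :: t) h1.2
    have hMub : ∀ p ∈ (h1 :: h2 :: t), p.2 ≤ M := by
      intro p hp
      rcases List.mem_cons.mp hp with rfl | hp
      · exact hMax.1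
      · exact hMax.2 p hp
    have hMex : ∃ q ∈ (h1 :: h2 :: t), q.2 = M := by
      rcases wMax_mem (h2 :: t) h1.2 with h | ⟨q, hq, hqe⟩
      · exact ⟨h1, List.mem_cons_self, h.symm⟩
      · exact ⟨q, List.mem_cons_of_mem _ hq, hqe⟩
    have hsh_mem : sh ∈ (h1 :: h2 :: t) := hperm.mem_iff.mp (hs ▸ List.mem_cons_self)
    have hMeq : sh.2 = M := by
      obtain ⟨q, hq, hqe⟩ := hMex
      exact le_antisymm (hMub sh hsh_mem) (hqe ▸ hhead q hq)
    have hmin := wMin_le (h2 :: t) (h1.2, h1.1)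
    have hmlb : ∀ p ∈ (h1 :: h2 :: t), m.1 ≤ p.2 := by
      intro p hp
      rcases List.mem_cons.mp hp with rfl | hp
      · exact hmin.1
      · exact hmin.2 p hp
    have hqq : ∃ q ∈ (h1 :: h2 :: t), q = (m.2, m.1) := by
      rcases wMin_mem (h2 :: t) (h1.2, h1.1) with h | ⟨q, hq, hqe⟩
      · refine ⟨h1, List.mem_cons_self, ?_⟩
        rw [hmdef, h]
      · exact ⟨q, List.mem_cons_of_mem _ hq, hqe.symm⟩
    obtain ⟨q, hqmem, hqe⟩ := hqq
    have hq2 : q.2 = m.1 := by rw [hqe]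
    have hzq : z = q := by
      have ha : z.2 ≤ q.2 := hzmin q hqmem
      have hb' : q.2 ≤ z.2 := hq2 ▸ hmlb z hzmem
      exact List.inj_on_of_nodup_map hnd hzmem hqmem (le_antisymm ha hb')
    have hz1 : z.1 = m.2 := by rw [hzq, hqe]
    have hz2 : z.2 = m.1 := by rw [hzq, hq2]
    have hlen : 1 < (h1 :: h2 :: t).length := by simp
    have hlenS : (sh :: st').length = (h1 :: h2 :: t).length := by
      rw [← hs]; exact hperm.length_eq
    have hlen2 : 1 < (sh :: st').length := by rw [hlenS]; exact hlen
    have hSL2 : (sh :: st').getLast? = some z := by rw [← hs]; exact hSL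
    have hA : aRes (h1 :: h2 :: t) lastTwo =
        (if z.1 ∈ demotions then (if z.1 ∈ lastTwo then z.2 else sh.2) else sh.2) := by
      simp only [aRes]
      rw [if_neg (by simp : ¬((h1 :: h2 :: t).isEmpty = true))]
      rw [if_pos hlen, ← hSdef, hs, if_pos hlen2]
      rw [PySem.List.pyGet?_neg_one, hSL2]
      simp only [Option.getD_some, PySem.List.pyGet?_zero_cons]
      by_cases hd : z.1 ∈ demotions
      · by_cases hl : z.1 ∈ lastTwo
        · simp [hd, hl]
        · simp [hd, hl]
      · simp [hd]
    have hB : bRes (h1 :: h2 :: t) lastTwo =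
        (if m.2 ∈ demotions then (if m.2 ∈ lastTwo then m.1 else M) else M) := by
      simp only [bRes]
      rw [hb]
      simp
      intro hcon
      exact absurd hcon (by omega)
    rw [hA, hB, hz1, hz2, hMeq]

-- ===== VERDICT (by name: the statement is the Claim_ definition above) =====
theorem extract_rank_py_spec : Claim_equal_extract_rank_py := by
  intro title _
  unfold Spec_extract_rank_py
  rw [portA_eq, portB_eq]
  apply core
  have h0 : (rankHierarchy.map (fun p => p.2)).Nodup := by decide
  exact h0.sublist (List.Sublist.map _ List.filter_sublist)
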